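-- pv_equiv track=rewrite | github.com/nsm23/Ylab | home_work_1/task_4.py | bananas
-- ===== SOURCE A (Python) =====
-- from itertools import combinations
--
-- def bananas(s: str) -> set:
--     res = set()
--     word = 'banana'
--     count = len(s) - len(word)
--     pool_words = combinations(range(len(s)), count)
--     for i in pool_words:
--         temp_lst = list(s)
--         for a in i:
--             temp_lst[a] = '-'
--         update_str = ''.join(temp_lst)
--         if update_str.replace('-', '') == word:
--             res.add(update_str)
--     return res
-- ===== SOURCE B (Python) =====
-- def bananas(s: str) -> set:
--     # Dynamic programming over the string, right to left: row k holds every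
--     # masking of the current suffix whose kept letters spell 'banana'[k:].
--     word = 'banana'
--     if len(s) < len(word):
--         raise ValueError('the string is shorter than the word to spell')
--     nxt = [[], [], [], [], [], [], [[]]]
--     for c in reversed(s):
--         cur = []
--         for k in range(7):
--             row = [['-'] + t for t in nxt[k]]
--             if k < 6 and c == word[k]:
--                 row += [[c] + t for t in nxt[k + 1]]
--             cur.append(row)
--         nxt = cur
--     return {''.join(t) for t in nxt[0]}
-- ===== Notes on version B (the rewrite author's own statement) =====
-- stated objective: faster
-- what changed: Instead of enumerating all C(n,n-6) maskings and testing each, B runs a right-to-left dynamic program over the string that directly builds only the maskings whose kept letters spell 'banana', so no combinatorial enumeration happens at all.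
import Mathlib
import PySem

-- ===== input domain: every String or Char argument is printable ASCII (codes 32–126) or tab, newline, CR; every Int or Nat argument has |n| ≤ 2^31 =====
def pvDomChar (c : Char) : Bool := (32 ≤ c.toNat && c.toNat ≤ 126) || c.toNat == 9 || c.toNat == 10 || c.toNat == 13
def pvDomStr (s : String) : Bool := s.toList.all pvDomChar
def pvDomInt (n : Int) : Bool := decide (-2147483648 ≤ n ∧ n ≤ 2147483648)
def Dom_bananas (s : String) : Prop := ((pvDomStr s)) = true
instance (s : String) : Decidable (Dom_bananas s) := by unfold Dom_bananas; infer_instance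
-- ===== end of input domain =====

-- B replaces A's enumeration of all C(n,n-6) maskings by a right-to-left DP that
-- builds only the maskings whose kept letters spell 'banana' (objective: faster).

-- ===== PORT A =====
def bananas (s : String) : List String :=
  let word := "banana"
  let count : Int := PySem.Str.len s - PySem.Str.len word
  let pool := PySem.List.combinations (PySem.List.pyRange 0 (PySem.Str.len s)) count.toNat
  pool.foldl (fun res i =>
    let temp := i.foldl (fun l a => PySem.List.pySetD l a '-') s.toList
    let upd := String.ofList temp
    if PySem.Str.replace upd "-" "" = word then PySem.Set.add res upd else res)
    PySem.Set.empty

-- ===== PORT B =====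
-- one step of the DP: given the rows for the suffix (row k = maskings spelling word[k:]),
-- produce the rows after prepending character c; recursion over the word suffix = loop over k
def bananasStep (c : Char) : List Char → List (List (List Char)) → List (List (List Char))
  | [], rs => [(rs.headD []).map (fun t => '-' :: t)]
  | wk :: w', r :: rs =>
      ((r.map (fun t => '-' :: t)) ++
        (if c = wk then (rs.headD []).map (fun t => c :: t) else [])) :: bananasStep c w' rs
  | _ :: _, [] => []

def bananas_alt (s : String) : List String :=
  let word := "banana".toList
  let final := s.toList.foldr (fun c rs => bananasStep c word rs) [[], [], [], [], [], [], [[]]]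
  PySem.Set.ofList ((final.headD []).map (fun t => String.ofList t))

-- ===== PRECONDITION & SPEC =====
-- A raises ValueError when len(s) < 6 (combinations with a negative r); those inputs are excluded.
def Pre_bananas (s : String) : Prop := 6 ≤ s.toList.length
instance (s : String) : Decidable (Pre_bananas s) := by unfold Pre_bananas; infer_instance
def pvWitness_bananas : String := "bananassss"

def Spec_bananas (s : String) (out : List String) : Prop := out = bananas_alt s
instance (s : String) (out : List String) : Decidable (Spec_bananas s out) := by unfold Spec_bananas; infer_instance

-- ===== CLAIM (what is proved, stated in full; the proofs are below) =====
def Claim_equal_bananas : Prop := ∀ (s : String), Dom_bananas s → Pre_bananas s → Spec_bananas s (bananas s)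
-- ===== LEMMAS AND PROOFS =====

-- the word as a char list
def bwChars : List Char := "banana".toList

-- dash-masking of cs at the (Nat) positions in S
def maskN (cs : List Char) (S : List Nat) : List Char := S.foldl (fun l a => l.set a '-') cs

-- "keep the non-dash characters" as a Bool predicate
def pNotDash : Char → Bool := fun c => c != '-'

-- the test A applies to a masked string, at char-list level
def predC (t : List Char) : Bool := decide (t.filter pNotDash = bwChars)

-- the list of all maskings of cs whose kept letters spell w, ascending
def gSpec : List Char → List Char → List (List Char)
  | w, [] => if w = [] then [[]] else []
  | w, c :: cs =>
      (gSpec w cs).map (fun t => '-' :: t) ++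
        (match w with
         | [] => []
         | wk :: w' => if c = wk then (gSpec w' cs).map (fun t => c :: t) else [])

-- the DP rows: one gSpec per suffix of the word
def rowsL : List Char → List Char → List (List (List Char))
  | [], cs => [gSpec [] cs]
  | wk :: w', cs => gSpec (wk :: w') cs :: rowsL w' cs

theorem rowsL_headD (w cs : List Char) : (rowsL w cs).headD [] = gSpec w cs := by
  cases w <;> rfl

theorem bananasStep_rowsL (c : Char) (w cs : List Char) :
    bananasStep c w (rowsL w cs) = rowsL w (c :: cs) := by
  induction w with
  | nil => simp [rowsL, bananasStep, gSpec]
  | cons wk w' ih =>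
    simp only [rowsL, bananasStep, ih, rowsL_headD]
    rfl

theorem foldr_rowsL (cs : List Char) :
    cs.foldr (fun c rs => bananasStep c bwChars rs) [[], [], [], [], [], [], [[]]] = rowsL bwChars cs := by
  induction cs with
  | nil => decide
  | cons c cs ih => simp only [List.foldr_cons, ih, bananasStep_rowsL]

theorem bananas_alt_eq (s : String) :
    bananas_alt s = PySem.Set.ofList ((gSpec bwChars s.toList).map (fun t => String.ofList t)) := by
  show PySem.Set.ofList ((((s.toList.foldr (fun c rs => bananasStep c bwChars rs)
      [[], [], [], [], [], [], [[]]])).headD []).map (fun t => String.ofList t)) = _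
  rw [foldr_rowsL, rowsL_headD]

theorem length_maskN (cs : List Char) (S : List Nat) : (maskN cs S).length = cs.length := by
  induction S generalizing cs with
  | nil => rfl
  | cons a S ih => simpa [maskN] using (ih (cs.set a '-')).trans (by simp)

theorem getElem_maskN (cs : List Char) (S : List Nat) (i : Nat) (hi : i < cs.length)
    (hi' : i < (maskN cs S).length) :
    (maskN cs S)[i] = if i ∈ S then '-' else cs[i] := by
  induction S generalizing cs with
  | nil => simp [maskN]
  | cons a S ih =>
    have hlen : i < (cs.set a '-').length := by simpa using hi
    have hlen2 : i < (maskN (cs.set a '-') S).length := by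
      rw [length_maskN]; exact hlen
    have := ih (cs.set a '-') hlen hlen2
    show (maskN (cs.set a '-') S)[i]'hlen2 = _
    rw [this]
    by_cases hS : i ∈ S
    · simp [hS]
    · by_cases ha : i = a
      · subst ha
        simp [hS]
      · have ha' : a ≠ i := fun h => ha h.symm
        simp [hS, ha, ha']
      

theorem mem_gSpec_iff (w cs t : List Char) (hw : '-' ∉ w) :
    t ∈ gSpec w cs ↔ t.filter pNotDash = w ∧ List.Forall₂ (fun a b => a = '-' ∨ a = b) t cs := by
  induction cs generalizing w t with
  | nil =>
    simp only [gSpec, List.forall₂_nil_right_iff]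
    constructor
    · intro h
      split_ifs at h with hw0
      · simp only [List.mem_singleton] at h
        subst h; subst hw0; simp
      · simp at h
    · rintro ⟨hf, rfl⟩
      simp only [List.filter_nil] at hf
      simp [← hf]
  | cons c cs ih =>
    cases t with
    | nil =>
      simp only [gSpec, List.mem_append, List.mem_map]
      constructor
      · rintro (⟨a, _, ha⟩ | hB)
        · exact absurd ha (by simp)
        · cases w with
          | nil => simp at hB
          | cons wk w' =>
            by_cases hc : c = wk <;> simp [hc] at hB
      · rintro ⟨_, hF⟩
        exact absurd hF (by simp)
    | cons x t' =>
      have hsplit : ((x :: t') ∈ gSpec w (c :: cs)) ↔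
          (x = '-' ∧ t' ∈ gSpec w cs) ∨
          (∃ wk w', w = wk :: w' ∧ c = wk ∧ x = c ∧ t' ∈ gSpec w' cs) := by
        simp only [gSpec, List.mem_append, List.mem_map]
        constructor
        · rintro (⟨a, ha, heq⟩ | hB)
          · cases heq; exact Or.inl ⟨rfl, ha⟩
          · cases w with
            | nil => simp at hB
            | cons wk w' =>
              by_cases hc : c = wk
              · change x :: t' ∈ if c = wk then List.map (fun t => c :: t) (gSpec w' cs) else [] at hB
                rw [if_pos hc, List.mem_map] at hB
                obtain ⟨a, ha, heq⟩ := hB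
                cases heq
                exact Or.inr ⟨wk, w', rfl, hc, rfl, ha⟩
              · simp [hc] at hB
        · rintro (⟨rfl, ht⟩ | ⟨wk, w', rfl, hc, rfl, ht⟩)
          · exact Or.inl ⟨t', ht, rfl⟩
          · refine Or.inr ?_
            show x :: t' ∈ if x = wk then List.map (fun t => x :: t) (gSpec w' cs) else []
            rw [if_pos hc, List.mem_map]
            exact ⟨t', ht, rfl⟩
      rw [hsplit]
      simp only [List.forall₂_cons]
      by_cases hx : x = '-'
      · subst hx
        have hfil : ('-' :: t').filter pNotDash = t'.filter pNotDash := by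
          simp [pNotDash]
        rw [hfil]
        constructor
        · rintro (⟨_, ht⟩ | ⟨wk, w', rfl, hc, hdash, _⟩)
          · obtain ⟨h1, h2⟩ := (ih w t' hw).mp ht
            exact ⟨h1, Or.inl rfl, h2⟩
          · exfalso
            exact hw (by rw [hdash.trans hc]; exact List.mem_cons_self)
        · rintro ⟨hf, _, hF⟩
          exact Or.inl ⟨rfl, (ih w t' hw).mpr ⟨hf, hF⟩⟩
      · have hfil : ((x :: t').filter pNotDash) = x :: t'.filter pNotDash := by
          simp [pNotDash, hx]
        rw [hfil]
        constructor
        · rintro (⟨hdash, _⟩ | ⟨wk, w', rfl, hc, hxc, ht⟩)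
          · exact absurd hdash hx
          · have hw' : '-' ∉ w' := fun h => hw (List.mem_cons_of_mem _ h)
            obtain ⟨h1, h2⟩ := (ih w' t' hw').mp ht
            exact ⟨by rw [h1, hxc, hc], Or.inr hxc, h2⟩
        · rintro ⟨hf, hxor, hF⟩
          have hxc : x = c := hxor.resolve_left hx
          cases w with
          | nil => simp at hf
          | cons wk w' =>
            have hw' : '-' ∉ w' := fun h => hw (List.mem_cons_of_mem _ h)
            rw [List.cons_eq_cons] at hf
            obtain ⟨hxwk, hrest⟩ := hf
            exact Or.inr ⟨wk, w', rfl, by rw [← hxwk, hxc], hxc,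
              (ih w' t' hw').mpr ⟨hrest, hF⟩⟩

theorem pairwise_gSpec (w cs : List Char) (hw : ∀ ch ∈ w, '-' < ch) :
    (gSpec w cs).Pairwise (· < ·) := by
  induction cs generalizing w with
  | nil =>
    simp only [gSpec]
    split_ifs <;> simp
  | cons c cs ih =>
    simp only [gSpec]
    rw [List.pairwise_append]
    refine ⟨?_, ?_, ?_⟩
    · rw [List.pairwise_map]
      exact (ih w hw).imp (fun h => by
        rw [List.cons_lt_cons_iff]; exact Or.inr ⟨rfl, h⟩)
    · cases w with
      | nil => simp
      | cons wk w' =>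
        by_cases hc : c = wk
        · show List.Pairwise _ (if c = wk then List.map (fun t => c :: t) (gSpec w' cs) else [])
          rw [if_pos hc, List.pairwise_map]
          exact (ih w' (fun ch h => hw ch (List.mem_cons_of_mem _ h))).imp (fun h => by
            rw [List.cons_lt_cons_iff]; exact Or.inr ⟨rfl, h⟩)
        · simp [hc]
    · intro a ha b hb
      rw [List.mem_map] at ha
      obtain ⟨t1, _, rfl⟩ := ha
      cases w with
      | nil => simp at hb
      | cons wk w' =>
        by_cases hc : c = wk
        · change b ∈ if c = wk then List.map (fun t => c :: t) (gSpec w' cs) else [] at hb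
          rw [if_pos hc, List.mem_map] at hb
          obtain ⟨t2, _, rfl⟩ := hb
          rw [List.cons_lt_cons_iff]
          exact Or.inl (hc ▸ hw wk List.mem_cons_self)
        · simp [hc] at hb

theorem pairwise_combinations (l : List Nat) (r : Nat) (hl : l.Pairwise (· < ·)) :
    (PySem.List.combinations l r).Pairwise (· < ·) := by
  induction l generalizing r with
  | nil =>
    cases r with
    | zero => simp [PySem.List.combinations_zero]
    | succ r => simp [PySem.List.combinations_nil_succ]
  | cons x xs ih =>
    cases r with
    | zero => simp [PySem.List.combinations_zero]
    | succ r =>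
      rw [PySem.List.combinations_cons_succ, List.pairwise_append]
      rw [List.pairwise_cons] at hl
      obtain ⟨hx, hxs⟩ := hl
      refine ⟨?_, ih (r + 1) hxs, ?_⟩
      · rw [List.pairwise_map]
        exact (ih r hxs).imp (fun h => by
          rw [List.cons_lt_cons_iff]; exact Or.inr ⟨rfl, h⟩)
      · intro a ha b hb
        rw [List.mem_map] at ha
        obtain ⟨S1, _, rfl⟩ := ha
        obtain ⟨hsub, hlen⟩ := (PySem.List.mem_combinations_iff _ _ _).mp hb
        cases b with
        | nil => simp at hlen
        | cons y S2 =>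
          have hy : y ∈ xs := hsub.subset List.mem_cons_self
          rw [List.cons_lt_cons_iff]
          exact Or.inl (hx y hy)

theorem length_filter_split (l : List Char) (p : Char → Bool) :
    (l.filter p).length + (l.filter (fun a => !p a)).length = l.length := by
  induction l with
  | nil => simp
  | cons a l ih => by_cases h : p a <;> simp [h] <;> omega

theorem length_filter_range_getD (l : List Char) (p : Char → Bool) (d : Char) :
    ((List.range l.length).filter (fun i => p (l.getD i d))).length = (l.filter p).length := by
  have hmap : (List.range l.length).map (fun i => l.getD i d) = l := by
    apply List.ext_getElem (by simp)
    intro i h1 h2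
    simp [List.getElem?_eq_getElem h2]
  conv_rhs => rw [← hmap]
  rw [List.filter_map, List.length_map]
  rfl

theorem dash_mem (cs : List Char) (S : List Nat) (hS : S.Sublist (List.range cs.length))
    (hk : S.length = cs.length - 6) (h6 : 6 ≤ cs.length)
    (hp : (maskN cs S).filter pNotDash = bwChars) :
    ∀ i, (hi : i < cs.length) → cs[i] = '-' → i ∈ S := by
  intro i hi hdash
  have hn : (maskN cs S).length = cs.length := length_maskN cs S
  have hnodupS : S.Nodup := List.Nodup.sublist hS List.nodup_range
  have hmemQ : ∀ j, (j ∈ (List.range cs.length).filter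
      (fun j => decide ((maskN cs S).getD j '-' = '-'))) ↔
      (j < cs.length ∧ (maskN cs S).getD j '-' = '-') := by
    intro j; simp [List.mem_filter, List.mem_range]
  have hgetD : ∀ j, (hj : j < cs.length) →
      (maskN cs S).getD j '-' = if j ∈ S then '-' else cs[j] := by
    intro j hj
    rw [List.getD_eq_getElem _ _ (by rw [hn]; exact hj)]
    exact getElem_maskN cs S j hj (by rw [hn]; exact hj)
  have hSQ : ∀ j ∈ S, j ∈ (List.range cs.length).filter
      (fun j => decide ((maskN cs S).getD j '-' = '-')) := by
    intro j hj
    have hjn : j < cs.length := List.mem_range.mp (hS.subset hj)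
    exact (hmemQ j).mpr ⟨hjn, by rw [hgetD j hjn]; simp [hj]⟩
  have hnot : (fun a => !pNotDash a) = (fun c => decide (c = '-')) := by
    funext c; by_cases h : c = '-' <;> simp [pNotDash, h]
  have hQlen : ((List.range cs.length).filter
      (fun j => decide ((maskN cs S).getD j '-' = '-'))).length = cs.length - 6 := by
    have h1 := length_filter_range_getD (maskN cs S) (fun c => decide (c = '-')) '-'
    rw [hn] at h1
    have h2 := length_filter_split (maskN cs S) pNotDash
    rw [hnot] at h2
    have h3 : ((maskN cs S).filter pNotDash).length = 6 := by rw [hp]; rfl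
    omega
  have hnodupQ : ((List.range cs.length).filter
      (fun j => decide ((maskN cs S).getD j '-' = '-'))).Nodup :=
    List.Nodup.filter _ List.nodup_range
  have hsub : S.toFinset ⊆ ((List.range cs.length).filter
      (fun j => decide ((maskN cs S).getD j '-' = '-'))).toFinset := by
    intro j hj
    rw [List.mem_toFinset] at hj ⊢
    exact hSQ j hj
  have hfeq := Finset.eq_of_subset_of_card_le hsub (by
    rw [List.toFinset_card_of_nodup hnodupS, List.toFinset_card_of_nodup hnodupQ, hk, hQlen])
  have hiQ : i ∈ (List.range cs.length).filter
      (fun j => decide ((maskN cs S).getD j '-' = '-')) := by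
    refine (hmemQ i).mpr ⟨hi, ?_⟩
    rw [hgetD i hi]
    by_cases hiS : i ∈ S <;> simp [hiS, hdash]
  have := hfeq ▸ (List.mem_toFinset.mpr hiQ)
  exact List.mem_toFinset.mp this

theorem lex_firstdiff_nat (S1 S2 : List Nat) (hlen : S1.length = S2.length) (h : S1 < S2) :
    ∃ j, ∃ hj1 : j < S1.length, ∃ hj2 : j < S2.length, S1[j] < S2[j] ∧
      ∀ i, (h1 : i < S1.length) → (h2 : i < S2.length) → i < j → S1[i] = S2[i] := by
  induction S1 generalizing S2 with
  | nil =>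
    cases S2 with
    | nil => exact absurd h (lt_irrefl _)
    | cons b m => simp at hlen
  | cons a l ih =>
    cases S2 with
    | nil => simp at hlen
    | cons b m =>
      rw [List.cons_lt_cons_iff] at h
      rcases h with hab | ⟨rfl, hlm⟩
      · exact ⟨0, by simp, by simp, by simpa, fun i h1 h2 hlt => absurd hlt (by omega)⟩
      · obtain ⟨j, hj1, hj2, hjlt, hagr⟩ := ih m (by simpa using hlen) hlm
        refine ⟨j + 1, by simpa using hj1, by simpa using hj2, by simpa using hjlt, ?_⟩
        intro i h1 h2 hlt
        cases i with
        | zero => rfl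
        | succ i =>
          simpa using hagr i (by simpa using h1) (by simpa using h2) (by omega)

theorem lt_of_firstdiff (t1 t2 : List Char) (j : Nat) (hj1 : j < t1.length) (hj2 : j < t2.length)
    (hagree : ∀ i, (h1 : i < t1.length) → (h2 : i < t2.length) → i < j → t1[i] = t2[i])
    (hlt : t1[j] < t2[j]) : t1 < t2 := by
  induction j generalizing t1 t2 with
  | zero =>
    cases t1 with
    | nil => simp at hj1
    | cons a l1 =>
      cases t2 with
      | nil => simp at hj2
      | cons b l2 =>
        rw [List.cons_lt_cons_iff]
        exact Or.inl (by simpa using hlt)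
  | succ j ih =>
    cases t1 with
    | nil => simp at hj1
    | cons a l1 =>
      cases t2 with
      | nil => simp at hj2
      | cons b l2 =>
        rw [List.cons_lt_cons_iff]
        refine Or.inr ⟨by simpa using hagree 0 (by simp) (by simp) (by omega), ?_⟩
        exact ih l1 l2 (by simpa using hj1) (by simpa using hj2)
          (fun i h1 h2 hlt => by simpa using hagree (i+1) (by simpa using h1) (by simpa using h2) (by omega))
          (by simpa using hlt)

theorem bw_no_dash : '-' ∉ bwChars := by decide

theorem bw_gt_dash : ∀ c ∈ bwChars, '-' < c := by
  have h : bwChars = ['b','a','n','a','n','a'] := by decide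
  rw [h]
  intro c hc
  simp only [List.mem_cons, List.not_mem_nil, or_false] at hc
  rcases hc with rfl | rfl | rfl | rfl | rfl | rfl <;> decide

theorem mask_lt_mask (cs : List Char) (S1 S2 : List Nat)
    (h1 : S1.Sublist (List.range cs.length)) (h2 : S2.Sublist (List.range cs.length))
    (hk1 : S1.length = cs.length - 6) (hk2 : S2.length = cs.length - 6) (h6 : 6 ≤ cs.length)
    (hp2 : (maskN cs S2).filter pNotDash = bwChars)
    (hlt : S1 < S2) : maskN cs S1 < maskN cs S2 := by
  obtain ⟨j, hj1, hj2, hjlt, hagree⟩ := lex_firstdiff_nat S1 S2 (hk1.trans hk2.symm) hlt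
  have hs1 : S1.Pairwise (· < ·) := List.Pairwise.sublist h1 List.pairwise_lt_range
  have hs2 : S2.Pairwise (· < ·) := List.Pairwise.sublist h2 List.pairwise_lt_range
  have hmono1 := (List.pairwise_iff_getElem).mp hs1
  have hmono2 := (List.pairwise_iff_getElem).mp hs2
  have hbound : ∀ a ∈ S2, a < cs.length := fun a ha => List.mem_range.mp (h2.subset ha)
  have hbound1 : ∀ a ∈ S1, a < cs.length := fun a ha => List.mem_range.mp (h1.subset ha)
  -- q := S1[j]
  have hq : S1[j] < cs.length := hbound1 _ (List.getElem_mem hj1)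
  -- below q, membership in S1 and S2 agree
  have hmemiff : ∀ p, p < S1[j] → (p ∈ S1 ↔ p ∈ S2) := by
    intro p hp
    constructor
    · intro hmem
      obtain ⟨k, hk, hkp⟩ := List.mem_iff_getElem.mp hmem
      have hkj : k < j := by
        by_contra hge
        rcases Nat.lt_or_ge j k with hjk | hkj'
        · exact absurd (hkp ▸ hmono1 j k (by omega) hk hjk) (by omega)
        · have : k = j := by omega
          subst this; omega
      rw [hagree k hk (by omega) hkj] at hkp
      exact hkp ▸ List.getElem_mem (by omega)
    · intro hmem
      obtain ⟨k, hk, hkp⟩ := List.mem_iff_getElem.mp hmem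
      have hkj : k < j := by
        by_contra hge
        have hge' : j ≤ k := by omega
        have : S2[j] ≤ S2[k] := by
          rcases Nat.lt_or_ge j k with hjk | _
          · exact le_of_lt (hmono2 j k (by omega) hk hjk)
          · have : j = k := by omega
            subst this; exact le_refl _
        omega
      rw [← hagree k (by omega) hk hkj] at hkp
      exact hkp ▸ List.getElem_mem (by omega)
  -- q ∈ S1, q ∉ S2
  have hqS1 : S1[j] ∈ S1 := List.getElem_mem hj1
  have hqS2 : S1[j] ∉ S2 := by
    intro hmem
    obtain ⟨k, hk, hkp⟩ := List.mem_iff_getElem.mp hmem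
    rcases Nat.lt_trichotomy k j with hkj | rfl | hjk
    · rw [← hagree k (by omega) hk hkj] at hkp
      have := hmono1 k j (by omega) (by omega) hkj
      omega
    · omega
    · have := hmono2 j k (by omega) hk hjk
      omega
  have hcsq : cs[S1[j]] ≠ '-' := by
    intro hdash
    exact hqS2 (dash_mem cs S2 h2 hk2 h6 hp2 (S1[j]) hq hdash)
  -- lengths
  have hn1 : (maskN cs S1).length = cs.length := length_maskN cs S1
  have hn2 : (maskN cs S2).length = cs.length := length_maskN cs S2
  -- value facts
  have hv1 : (maskN cs S1)[S1[j]]'(by omega) = '-' := by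
    rw [getElem_maskN cs S1 _ hq (by omega)]; simp [hqS1]
  have hv2 : (maskN cs S2)[S1[j]]'(by omega) = cs[S1[j]] := by
    rw [getElem_maskN cs S2 _ hq (by omega)]; simp [hqS2]
  -- the kept char is a banana letter, hence > '-'
  have hlt2 : '-' < cs[S1[j]] := by
    have hmem : cs[S1[j]] ∈ (maskN cs S2).filter pNotDash := by
      rw [List.mem_filter]
      refine ⟨hv2 ▸ List.getElem_mem (by omega), ?_⟩
      simp [pNotDash, hcsq]
    rw [hp2] at hmem
    exact bw_gt_dash _ hmem
  refine lt_of_firstdiff (maskN cs S1) (maskN cs S2) (S1[j]) (by omega) (by omega) ?_ ?_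
  · intro i hI1 hI2 hip
    rw [getElem_maskN cs S1 i (by omega) hI1, getElem_maskN cs S2 i (by omega) hI2]
    by_cases hmem : i ∈ S1
    · simp [hmem, (hmemiff i hip).mp hmem]
    · have hmem2 : i ∉ S2 := fun hm2 => hmem ((hmemiff i hip).mpr hm2)
      simp [hmem, hmem2]
  · rw [hv1, hv2]
    exact hlt2

theorem main_eq (cs : List Char) (h6 : 6 ≤ cs.length) :
    ((PySem.List.combinations (List.range cs.length) (cs.length - 6)).map (maskN cs)).filter predC
      = gSpec bwChars cs := by
  rw [List.filter_map]
  have hLmem : ∀ S ∈ (PySem.List.combinations (List.range cs.length) (cs.length - 6)).filter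
      (predC ∘ maskN cs),
      S.Sublist (List.range cs.length) ∧ S.length = cs.length - 6 ∧
        (maskN cs S).filter pNotDash = bwChars := by
    intro S hS
    rw [List.mem_filter] at hS
    obtain ⟨hc, hpred⟩ := hS
    obtain ⟨hsub, hlen⟩ := (PySem.List.mem_combinations_iff _ _ _).mp hc
    refine ⟨hsub, hlen, ?_⟩
    have : predC (maskN cs S) = true := hpred
    unfold predC at this
    exact of_decide_eq_true this
  have hnot : (fun a => !pNotDash a) = (fun c => decide (c = '-')) := by
    funext c; by_cases h : c = '-' <;> simp [pNotDash, h]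
  have hpwL : ((PySem.List.combinations (List.range cs.length) (cs.length - 6)).filter
      (predC ∘ maskN cs)).Pairwise (· < ·) :=
    List.Pairwise.filter _ (pairwise_combinations _ _ List.pairwise_lt_range)
  have hpw1 : (((PySem.List.combinations (List.range cs.length) (cs.length - 6)).filter
      (predC ∘ maskN cs)).map (maskN cs)).Pairwise (· < ·) := by
    rw [List.pairwise_map]
    refine List.Pairwise.imp_of_mem ?_ hpwL
    intro S1 S2 hS1 hS2 hlt
    obtain ⟨ha1, hb1, hc1⟩ := hLmem S1 hS1
    obtain ⟨ha2, hb2, hc2⟩ := hLmem S2 hS2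
    exact mask_lt_mask cs S1 S2 ha1 ha2 hb1 hb2 h6 hc2 hlt
  have hpw2 : (gSpec bwChars cs).Pairwise (· < ·) := pairwise_gSpec bwChars cs bw_gt_dash
  have hnd1 : (((PySem.List.combinations (List.range cs.length) (cs.length - 6)).filter
      (predC ∘ maskN cs)).map (maskN cs)).Nodup := hpw1.imp (fun h => ne_of_lt h)
  have hnd2 : (gSpec bwChars cs).Nodup := hpw2.imp (fun h => ne_of_lt h)
  have hperm : (((PySem.List.combinations (List.range cs.length) (cs.length - 6)).filter
      (predC ∘ maskN cs)).map (maskN cs)).Perm (gSpec bwChars cs) := by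
    rw [List.perm_ext_iff_of_nodup hnd1 hnd2]
    intro t
    constructor
    · intro ht
      rw [List.mem_map] at ht
      obtain ⟨S, hSL, rfl⟩ := ht
      obtain ⟨hsub, hlen, hfil⟩ := hLmem S hSL
      rw [mem_gSpec_iff bwChars cs _ bw_no_dash]
      refine ⟨hfil, ?_⟩
      rw [List.forall₂_iff_get]
      refine ⟨by rw [length_maskN], ?_⟩
      intro i hI1 hI2
      simp only [List.get_eq_getElem]
      rw [getElem_maskN cs S i hI2 hI1]
      by_cases hmem : i ∈ S <;> simp [hmem]
    · intro ht
      rw [mem_gSpec_iff bwChars cs t bw_no_dash] at ht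
      obtain ⟨hfil, hF⟩ := ht
      have hlen : t.length = cs.length := hF.length_eq
      have hget : ∀ i, (h1 : i < t.length) → t[i] = '-' ∨ t[i] = cs[i]'(by omega) := by
        intro i h1
        have := (List.forall₂_iff_get.mp hF).2 i h1 (by omega)
        simpa using this
      have hiffS : ∀ i, (hi : i < cs.length) →
          (i ∈ (List.range cs.length).filter (fun i => decide (t.getD i 'A' = '-')) ↔
            t[i]'(by omega) = '-') := by
        intro i hi
        rw [List.mem_filter, List.mem_range]
        rw [List.getD_eq_getElem t 'A' (show i < t.length by omega)]
        simp [hi]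
      have heq : maskN cs ((List.range cs.length).filter (fun i => decide (t.getD i 'A' = '-'))) = t := by
        apply List.ext_getElem (by rw [length_maskN]; omega)
        intro i hI1 hI2
        rw [getElem_maskN cs _ i (by omega) hI1]
        by_cases hmem : i ∈ (List.range cs.length).filter (fun i => decide (t.getD i 'A' = '-'))
        · rw [if_pos hmem]
          exact ((hiffS i (by omega)).mp hmem).symm
        · have hnd : ¬ t[i]'(by omega) = '-' := fun hd => hmem ((hiffS i (by omega)).mpr hd)
          rcases hget i (by omega) with hd | hcs
          · exact absurd hd hnd
          · rw [if_neg hmem]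
            exact hcs.symm
      rw [List.mem_map]
      refine ⟨(List.range cs.length).filter (fun i => decide (t.getD i 'A' = '-')), ?_, heq⟩
      rw [List.mem_filter]
      constructor
      · rw [PySem.List.mem_combinations_iff]
        refine ⟨List.filter_sublist, ?_⟩
        have h1 := length_filter_range_getD t (fun c => decide (c = '-')) 'A'
        rw [hlen] at h1
        have h2 := length_filter_split t pNotDash
        rw [hnot] at h2
        have h3 : (t.filter pNotDash).length = 6 := by rw [hfil]; rfl
        omega
      · show predC (maskN cs _) = true
        rw [heq]
        simp [predC, hfil]
  exact List.Perm.eq_of_pairwise (fun a b _ _ hab hba => absurd hba (lt_asymm hab)) hpw1 hpw2 hperm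

theorem replace_go_dash (fuel : Nat) (l acc : List Char) (h : l.length ≤ fuel) :
    PySem.Chars.replace.go ['-'] [] fuel l acc = acc.reverse ++ l.filter pNotDash := by
  induction fuel generalizing l acc with
  | zero =>
    cases l with
    | nil => simp [PySem.Chars.replace.go]
    | cons c t => simp at h
  | succ fuel ih =>
    cases l with
    | nil => simp [PySem.Chars.replace.go]
    | cons c t =>
      rw [PySem.Chars.replace.go]
      by_cases hc : c = '-'
      · subst hc
        simp only [List.isPrefixOf, BEq.rfl, Bool.true_and, if_true]
        rw [ih _ _ (by simp at h ⊢; omega)]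
        simp [pNotDash]
      · have hpref : (['-'].isPrefixOf (c :: t)) = false := by
          simp [List.isPrefixOf]
          exact fun hh => hc hh.symm
        rw [hpref]
        simp only [Bool.false_eq_true, if_false]
        rw [ih _ _ (by simp at h ⊢; omega)]
        simp [pNotDash, hc]

theorem replace_dash (t : List Char) :
    PySem.Chars.replace t ['-'] [] = t.filter pNotDash := by
  rw [PySem.Chars.replace]
  simp only [List.isEmpty_cons, Bool.false_eq_true, if_false]
  rw [replace_go_dash t.length t [] le_rfl]
  simp

theorem foldl_ite_add (l : List (List Int)) (f : List Int → String) (p : String → Prop)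
    [DecidablePred p] (acc : PySem.Set String) :
    l.foldl (fun res x => if p (f x) then PySem.Set.add res (f x) else res) acc
      = PySem.Set.update acc ((l.map f).filter (fun u => decide (p u))) := by
  induction l generalizing acc with
  | nil => simp [PySem.Set.update_nil]
  | cons x l ih =>
    simp only [List.foldl_cons, List.map_cons]
    by_cases hp : p (f x)
    · rw [if_pos hp, List.filter_cons_of_pos (by simpa), ih, PySem.Set.update_cons]
    · rw [if_neg hp, List.filter_cons_of_neg (by simpa), ih]

theorem gSpec_nil_of_short (w cs : List Char) (h : cs.length < w.length) : gSpec w cs = [] := by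
  induction cs generalizing w with
  | nil =>
    cases w with
    | nil => simp at h
    | cons wk w' => simp [gSpec]
  | cons c cs ih =>
    cases w with
    | nil => simp at h
    | cons wk w' =>
      show ((gSpec (wk :: w') cs).map (fun t => '-' :: t) ++
        (if c = wk then (gSpec w' cs).map (fun t => c :: t) else [])) = []
      rw [ih (wk :: w') (by simp at h ⊢; omega)]
      by_cases hc : c = wk
      · rw [if_pos hc, ih w' (by simp at h ⊢; omega)]; simp
      · rw [if_neg hc]; simp

theorem bananas_eq_short (s : String) (h : s.toList.length < 6) : bananas s = bananas_alt s := by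
  rw [bananas_alt_eq, gSpec_nil_of_short bwChars s.toList (by
    have hbw : bwChars.length = 6 := by decide
    omega)]
  unfold bananas
  have hcount : (PySem.Str.len s - PySem.Str.len "banana").toNat = 0 := by
    rw [PySem.Str.len_eq, PySem.Str.len_eq]
    have hbw : ("banana".toList.length) = 6 := by decide
    omega
  show (PySem.List.combinations (PySem.List.pyRange 0 (PySem.Str.len s))
      (PySem.Str.len s - PySem.Str.len "banana").toNat).foldl
      (fun res i =>
        if PySem.Str.replace
            (String.ofList (i.foldl (fun l a => PySem.List.pySetD l a '-') s.toList)) "-" ""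
            = "banana"
        then PySem.Set.add res
            (String.ofList (i.foldl (fun l a => PySem.List.pySetD l a '-') s.toList))
        else res)
      PySem.Set.empty = _
  rw [hcount, PySem.List.combinations_zero]
  simp only [List.foldl_cons, List.foldl_nil]
  rw [if_neg ?hne]
  case hne =>
    intro heq
    rw [String.ext_iff, PySem.Str.toList_replace, String.toList_ofList] at heq
    have h1 : ("-" : String).toList = ['-'] := rfl
    have h2 : ("" : String).toList = [] := rfl
    rw [h1, h2, replace_dash] at heq
    have hlen := congrArg List.length heq
    have hle := List.length_filter_le pNotDash s.toList
    have hbw : (("banana" : String).toList.length) = 6 := by decide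
    omega
  rfl

theorem bananas_eq (s : String) : bananas s = bananas_alt s := by
  rcases Nat.lt_or_ge s.toList.length 6 with hlt | h
  · exact bananas_eq_short s hlt
  unfold bananas
  rw [bananas_alt_eq]
  have hlenw : ("banana".toList.length) = 6 := by decide
  have hlens : PySem.Str.len s = (s.toList.length : Int) := by rw [PySem.Str.len_eq]
  have hlenw' : PySem.Str.len "banana" = (6 : Int) := by
    rw [PySem.Str.len_eq, hlenw]; rfl
  show (PySem.List.combinations (PySem.List.pyRange 0 (PySem.Str.len s))
      (PySem.Str.len s - PySem.Str.len "banana").toNat).foldl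
      (fun res i =>
        if PySem.Str.replace
            (String.ofList (i.foldl (fun l a => PySem.List.pySetD l a '-') s.toList)) "-" ""
            = "banana"
        then PySem.Set.add res
            (String.ofList (i.foldl (fun l a => PySem.List.pySetD l a '-') s.toList))
        else res)
      PySem.Set.empty = _
  have hcount : (PySem.Str.len s - PySem.Str.len "banana").toNat = s.toList.length - 6 := by
    rw [hlens, hlenw']; omega
  have hrange : PySem.List.pyRange 0 (PySem.Str.len s) = (List.range s.toList.length).map (fun k : Nat => (k : Int)) := by
    rw [hlens]; exact PySem.List.pyRange_zero_natCast s.toList.length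
  rw [hcount, hrange, PySem.List.combinations_map]
  rw [foldl_ite_add _ (fun i => String.ofList (i.foldl (fun l a => PySem.List.pySetD l a '-') s.toList))
      (fun u => PySem.Str.replace u "-" "" = "banana") PySem.Set.empty]
  rw [PySem.Set.update_empty]
  congr 1
  rw [List.map_map]
  have hf : ((fun i => String.ofList (List.foldl (fun l a => PySem.List.pySetD l a '-') s.toList i)) ∘
      (List.map (fun k : Nat => (k : Int)))) = (fun S => String.ofList (maskN s.toList S)) := by
    funext S
    simp only [Function.comp, List.foldl_map, PySem.List.pySetD_natCast]
    rfl
  rw [hf]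
  have hmm : (PySem.List.combinations (List.range s.toList.length) (s.toList.length - 6)).map
      (fun S => String.ofList (maskN s.toList S)) =
      ((PySem.List.combinations (List.range s.toList.length) (s.toList.length - 6)).map
        (maskN s.toList)).map (fun t => String.ofList t) := by
    rw [List.map_map]; rfl
  rw [hmm, List.filter_map]
  have hpred : ((fun u => decide (PySem.Str.replace u "-" "" = "banana")) ∘ (fun t => String.ofList t))
      = predC := by
    funext t
    simp only [Function.comp]
    unfold predC
    apply decide_eq_decide.mpr
    rw [String.ext_iff, PySem.Str.toList_replace, String.toList_ofList]
    have h1 : ("-" : String).toList = ['-'] := rfl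
    have h2 : ("" : String).toList = [] := rfl
    rw [h1, h2, replace_dash]
    rfl
  rw [hpred, main_eq s.toList h]

-- ===== VERDICT (by name: the statement is the Claim_ definition above) =====
theorem bananas_spec : Claim_equal_bananas := by
  intro s _ _
  unfold Spec_bananas
  exact bananas_eq s
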